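-- pv_equiv track=rewrite | github.com/nfirbas/adventofcode2023 | Day21/day21.py | expand_matrix
-- ===== SOURCE A (Python) =====
-- def expand_matrix(data, factor):
--     return [
--         [
--             data[i % len(data)][j % len(data[0])]
--             for j in range(factor * len(data[0]))
--         ]
--         for i in range(factor * len(data))
--     ]
-- ===== SOURCE B (Python) =====
-- def expand_matrix(data, factor):
--     result = []
--     for _ in range(factor):
--         for row in data:
--             new_row = []
--             for _ in range(factor):
--                 new_row.extend(row)
--             result.append(new_row)
--     return result
-- ===== Notes on version B (the rewrite author's own statement) =====
-- stated objective: alternative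
-- what changed: Replaces the double modulo-indexed element-by-element comprehension over range(factor*N) x range(factor*M) with block replication: for each of the factor vertical copies, each original row is copied and self-concatenated factor times via list.extend.
-- outside the precondition, e.g. on expand_matrix([[1], [2, 3]], 1): A returns [[1], [2]], B returns [[1], [2, 3]]; on expand_matrix([[1, 2], [3]], 1): A raises IndexError, B returns [[1, 2], [3]]
import Mathlib
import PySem

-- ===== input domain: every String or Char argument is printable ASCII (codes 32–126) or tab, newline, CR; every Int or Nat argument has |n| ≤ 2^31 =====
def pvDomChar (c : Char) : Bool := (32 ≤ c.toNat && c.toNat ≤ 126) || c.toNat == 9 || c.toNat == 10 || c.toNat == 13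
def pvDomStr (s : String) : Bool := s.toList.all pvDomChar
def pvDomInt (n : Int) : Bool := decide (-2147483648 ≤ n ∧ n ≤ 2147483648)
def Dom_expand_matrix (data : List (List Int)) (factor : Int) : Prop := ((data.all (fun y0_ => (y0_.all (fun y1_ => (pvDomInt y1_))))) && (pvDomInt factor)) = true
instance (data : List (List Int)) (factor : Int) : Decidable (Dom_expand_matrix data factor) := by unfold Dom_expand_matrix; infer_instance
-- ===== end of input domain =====

-- B tiles by block replication (each row copied and self-concatenated factor times, the row
-- block repeated factor times) instead of A's per-element modulo indexing; same asymptotic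
-- cost, a different decomposition.

-- ===== PORT A =====
def expand_matrix (data : List (List Int)) (factor : Int) : List (List Int) :=
  (PySem.List.pyRange 0 (factor * (data.length : Int)) 1).map (fun i =>
    (PySem.List.pyRange 0 (factor * (((PySem.List.pyGetD data 0 []).length : Int))) 1).map (fun j =>
      PySem.List.pyGetD
        (PySem.List.pyGetD data (PySem.Int.mod i (data.length : Int)) [])
        (PySem.Int.mod j (((PySem.List.pyGetD data 0 []).length : Int))) 0))

-- ===== PORT B =====
def expand_matrix_alt (data : List (List Int)) (factor : Int) : List (List Int) :=
  (PySem.List.pyRange 0 factor 1).foldl (fun result _ =>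
    data.foldl (fun result row =>
      result ++ [(PySem.List.pyRange 0 factor 1).foldl (fun new_row _ => new_row ++ row) []]) result) []

-- ===== PRECONDITION & SPEC =====
-- Pre_ excludes ragged matrices when factor ≥ 1: there A either raises IndexError (a row
-- shorter than row 0) or returns rows silently truncated to row 0's width (a row longer than
-- row 0), an accident of its modulo indexing on input outside the natural rectangular domain.
def Pre_expand_matrix (data : List (List Int)) (factor : Int) : Prop :=
  factor ≤ 0 ∨ data = [] ∨ ∀ row ∈ data, row.length = (data.headD []).length
instance (data : List (List Int)) (factor : Int) : Decidable (Pre_expand_matrix data factor) := by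
  unfold Pre_expand_matrix; infer_instance

def pvWitness_expand_matrix : List (List Int) × Int := ([[1, 2], [3, 4]], 2)

def Spec_expand_matrix (data : List (List Int)) (factor : Int) (out : List (List Int)) : Prop :=
  out = expand_matrix_alt data factor
instance (data : List (List Int)) (factor : Int) (out : List (List Int)) : Decidable (Spec_expand_matrix data factor out) := by
  unfold Spec_expand_matrix; infer_instance

-- ===== CLAIM (what is proved, stated in full; the proofs are below) =====
def Claim_equal_expand_matrix : Prop := ∀ (data : List (List Int)) (factor : Int), Dom_expand_matrix data factor → Pre_expand_matrix data factor → Spec_expand_matrix data factor (expand_matrix data factor)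

-- ===== LEMMAS AND PROOFS =====

-- folding "append a fixed block" over any list = flatten of replicated block
theorem pv_foldl_append_const {α β : Type} (xs : List β) (blk acc : List α) :
    xs.foldl (fun r _ => r ++ blk) acc = acc ++ (List.replicate xs.length blk).flatten := by
  induction xs generalizing acc with
  | nil => simp
  | cons x xs ih => simp [ih, List.replicate_succ, List.append_assoc]

-- folding "append [g row]" over data = append of data.map g
theorem pv_foldl_append_map {α β : Type} (data : List α) (g : α → β) (acc : List β) :
    data.foldl (fun r row => r ++ [g row]) acc = acc ++ data.map g := by
  induction data generalizing acc with
  | nil => simp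
  | cons d ds ih => simp [ih, List.append_assoc]

theorem pv_B_outer (xs : List Int) (data : List (List Int)) (g : List Int → List Int)
    (acc : List (List Int)) :
    xs.foldl (fun res _ => data.foldl (fun r row => r ++ [g row]) res) acc
      = acc ++ (List.replicate xs.length (data.map g)).flatten := by
  induction xs generalizing acc with
  | nil => simp
  | cons x xs ih =>
    rw [List.foldl_cons, pv_foldl_append_map, ih]
    simp [List.replicate_succ, List.append_assoc]

-- map over range (t*N) of a function of k % N = flatten of t copies of map over range N
theorem pv_range_mul_mod {α : Type} (t N : Nat) (f : Nat → α) :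
    (List.range (t * N)).map (fun k => f (k % N)) = (List.replicate t ((List.range N).map f)).flatten := by
  induction t with
  | zero => simp
  | succ t ih =>
    have h2 : (List.range N).map ((fun k => f (k % N)) ∘ (fun i => t * N + i))
        = (List.range N).map f := by
      apply List.map_congr_left
      intro k hk
      simp only [Function.comp_apply]
      congr 1
      rw [Nat.add_comm, Nat.add_mul_mod_self_right, Nat.mod_eq_of_lt (List.mem_range.mp hk)]
    rw [Nat.succ_mul, List.range_add, List.map_append, ih, List.map_map, h2,
        List.replicate_succ', List.flatten_append]
    simp

theorem pv_map_getD_range {α : Type} (xs : List α) (d : α) :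
    (List.range xs.length).map (fun j => xs.getD j d) = xs := by
  apply List.ext_getElem
  · simp
  · intro i h1 h2
    simp [List.getD_eq_getElem?_getD, List.getElem?_eq_getElem h2]

-- normal form for B
theorem pv_B_eq (data : List (List Int)) (factor : Int) :
    expand_matrix_alt data factor
      = (List.replicate factor.toNat
          (data.map (fun row => (List.replicate factor.toNat row).flatten))).flatten := by
  have hlen : (PySem.List.pyRange 0 factor 1).length = factor.toNat := by
    simp [PySem.List.length_pyRange_one]
  unfold expand_matrix_alt
  rw [pv_B_outer, hlen]
  simp only [List.nil_append]
  congr 2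
  apply List.map_congr_left
  intro row _
  rw [pv_foldl_append_const, hlen]
  simp

theorem pv_toNat_mul (factor : Int) (N : Nat) : (factor * (N : Int)).toNat = factor.toNat * N := by
  rcases Int.le_total 0 factor with h | h
  · obtain ⟨t, rfl⟩ := Int.eq_ofNat_of_zero_le h
    rw [← Nat.cast_mul, Int.toNat_natCast, Int.toNat_natCast]
  · have h1 : factor * (N : Int) ≤ 0 := mul_nonpos_of_nonpos_of_nonneg h (by positivity)
    rw [Int.toNat_of_nonpos h1, Int.toNat_of_nonpos h, Nat.zero_mul]

theorem pv_map_getD_range_comp {α β : Type} (xs : List α) (d : α) (g : α → β) :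
    (List.range xs.length).map (fun n => g (xs.getD n d)) = xs.map g := by
  have h := congrArg (List.map g) (pv_map_getD_range xs d)
  rw [List.map_map] at h
  simpa [Function.comp] using h

-- A collapsed to the same normal form, on rectangular data
theorem pv_A_eq (data : List (List Int)) (factor : Int)
    (hrect : ∀ row ∈ data, row.length = (data.headD []).length) :
    expand_matrix data factor
      = (List.replicate factor.toNat
          (data.map (fun row => (List.replicate factor.toNat row).flatten))).flatten := by
  have hM : PySem.List.pyGetD data 0 [] = data.headD [] := by
    cases data <;> simp [PySem.List.pyGetD_zero]
  have hrow : ∀ n, n < data.length →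
      (PySem.List.pyRange 0 (factor * (((PySem.List.pyGetD data 0 []).length : Int))) 1).map
        (fun j => PySem.List.pyGetD (data.getD n [])
          (PySem.Int.mod j (((PySem.List.pyGetD data 0 []).length : Int))) 0)
      = (List.replicate factor.toNat (data.getD n [])).flatten := by
    intro n hn
    have hmem : data.getD n [] ∈ data := by
      rw [List.getD_eq_getElem data [] hn]; exact List.getElem_mem hn
    have h3 : (data.getD n []).length = (PySem.List.pyGetD data 0 []).length := by
      rw [hM]; exact hrect _ hmem
    rw [PySem.List.pyRange_one 0 (factor * (((PySem.List.pyGetD data 0 []).length : Int))), List.map_map]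
    have h1 : (factor * (((PySem.List.pyGetD data 0 []).length : Int)) - 0).toNat
        = factor.toNat * (PySem.List.pyGetD data 0 []).length := by
      rw [Int.sub_zero]; exact pv_toNat_mul _ _
    rw [h1]
    have h2 : ((fun j => PySem.List.pyGetD (data.getD n [])
          (PySem.Int.mod j (((PySem.List.pyGetD data 0 []).length : Int))) 0) ∘ fun k : Nat => 0 + (k : Int))
        = fun k : Nat => (data.getD n []).getD (k % (PySem.List.pyGetD data 0 []).length) 0 := by
      funext k
      simp only [Function.comp_apply, zero_add, PySem.Int.mod_natCast, PySem.List.pyGetD_natCast]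
    rw [h2, ← h3,
      pv_range_mul_mod factor.toNat (data.getD n []).length (fun x => (data.getD n []).getD x 0),
      pv_map_getD_range]
  unfold expand_matrix
  rw [PySem.List.pyRange_one 0 (factor * ((data.length : Int))), List.map_map]
  rw [show (factor * ((data.length : Int)) - 0).toNat = factor.toNat * data.length from by
    rw [Int.sub_zero]; exact pv_toNat_mul _ _]
  have h4 : ∀ k ∈ List.range (factor.toNat * data.length),
      ((fun i => (PySem.List.pyRange 0 (factor * (((PySem.List.pyGetD data 0 []).length : Int))) 1).map
          (fun j => PySem.List.pyGetD (PySem.List.pyGetD data (PySem.Int.mod i (data.length : Int)) [])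
            (PySem.Int.mod j (((PySem.List.pyGetD data 0 []).length : Int))) 0)) ∘ fun k : Nat => 0 + (k : Int)) k
        = (fun n => (List.replicate factor.toNat (data.getD n [])).flatten) (k % data.length) := by
    intro k hk
    have hN : 0 < data.length := by
      rcases Nat.eq_zero_or_pos data.length with h0 | h0
      · rw [h0, Nat.mul_zero] at hk; exact absurd hk (by simp)
      · exact h0
    simp only [Function.comp_apply, zero_add, PySem.Int.mod_natCast, PySem.List.pyGetD_natCast]
    exact hrow (k % data.length) (Nat.mod_lt k hN)
  rw [List.map_congr_left h4,
    pv_range_mul_mod factor.toNat data.length (fun n => (List.replicate factor.toNat (data.getD n [])).flatten),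
    pv_map_getD_range_comp data [] (fun row => (List.replicate factor.toNat row).flatten)]

-- ===== VERDICT (by name: the statement is the Claim_ definition above) =====
theorem expand_matrix_spec : Claim_equal_expand_matrix := by
  intro data factor _ hpre
  unfold Spec_expand_matrix
  rw [pv_B_eq]
  rcases hpre with h | h | h
  · -- factor ≤ 0: both sides are empty
    rw [Int.toNat_of_nonpos h]
    unfold expand_matrix
    have hb : factor * ((data.length : Int)) ≤ 0 :=
      mul_nonpos_of_nonpos_of_nonneg h (by positivity)
    rw [PySem.List.pyRange_one_eq_nil hb]
    simp
  · -- data = []: both sides are empty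
    subst h
    unfold expand_matrix
    simp [PySem.List.pyRange_one_eq_nil]
  · rw [pv_A_eq data factor h]
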